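-- pv_equiv track=rewrite | github.com/pypi-data/pypi-mirror-82 | packages/jatime/jatime-0.1.0.tar.gz/jatime-0.1.0/jatime/finder.py | _years_months_close_to
-- ===== SOURCE A (Python) =====
-- from typing import Generator, Optional, Tuple
--
-- def _years_months_close_to(
--     base_year: int, base_month: int, max_diff: Optional[int] = None
-- ) -> Generator[Tuple[int, int], None, None]:
--     if max_diff is None:
--         max_diff = 50
--
--     month = base_month
--     for m in range(max_diff * 2):
--         if m % 2 == 0:
--             month -= m
--         else:
--             month += m
--         q, r = divmod(month, 12)
--         if r != 0:
--             next_year = base_year + q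
--             next_month = r
--         else:
--             next_year = base_year + q - 1
--             next_month = 12
--         yield next_year, next_month
-- ===== SOURCE B (Python) =====
-- def _years_months_close_to(base_year, base_month, max_diff=None):
--     if max_diff is None:
--         max_diff = 50
--
--     def norm(total):
--         q, r = divmod(total, 12)
--         return (base_year + q, r) if r != 0 else (base_year + q - 1, 12)
--
--     if max_diff >= 1:
--         yield norm(base_month)
--         for d in range(1, max_diff + 1):
--             yield norm(base_month + d)
--             if d < max_diff:
--                 yield norm(base_month - d)
-- ===== Notes on version B (the rewrite author's own statement) =====
-- stated objective: simpler
-- what changed: Iterates over the distance d, emitting the normalized pair for base_month+d and (while d<max_diff) base_month-d directly, instead of accumulating an alternating +/- offset into a running month variable over range(2*max_diff).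
import Mathlib
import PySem

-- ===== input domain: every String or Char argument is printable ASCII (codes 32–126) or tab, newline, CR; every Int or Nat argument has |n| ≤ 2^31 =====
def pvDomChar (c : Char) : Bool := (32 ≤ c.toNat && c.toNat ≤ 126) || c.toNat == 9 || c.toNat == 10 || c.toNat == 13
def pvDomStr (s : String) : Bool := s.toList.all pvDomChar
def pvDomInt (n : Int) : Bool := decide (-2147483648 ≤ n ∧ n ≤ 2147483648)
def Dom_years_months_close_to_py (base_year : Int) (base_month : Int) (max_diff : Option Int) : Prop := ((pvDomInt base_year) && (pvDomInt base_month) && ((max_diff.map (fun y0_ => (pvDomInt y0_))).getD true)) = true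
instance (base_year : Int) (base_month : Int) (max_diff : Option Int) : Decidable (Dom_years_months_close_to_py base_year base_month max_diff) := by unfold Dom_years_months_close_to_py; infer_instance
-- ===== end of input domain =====

-- B iterates over the distance d, yielding base_month+d and (while d < max_diff) base_month-d,
-- instead of A's alternating +/- offset accumulated into a running month variable; objective: simpler.

-- ===== PORT A =====
-- loop body of A's for-loop: state = (month, yielded list)
def pvStepA (base_year : Int) (st : Int × List (Int × Int)) (m : Int) : Int × List (Int × Int) :=
  let month := if PySem.Int.mod m 2 = 0 then st.1 - m else st.1 + m
  let q := PySem.Int.floordiv month 12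
  let r := PySem.Int.mod month 12
  let p := if r ≠ 0 then (base_year + q, r) else (base_year + q - 1, (12 : Int))
  (month, st.2 ++ [p])

def years_months_close_to_py (base_year : Int) (base_month : Int) (max_diff : Option Int) : List (Int × Int) :=
  let md := max_diff.getD 50
  ((PySem.List.pyRange 0 (md * 2) 1).foldl (pvStepA base_year) (base_month, [])).2

-- ===== PORT B =====
-- Source B's nested helper norm(total)
def pvNorm (base_year : Int) (total : Int) : Int × Int :=
  let q := PySem.Int.floordiv total 12
  let r := PySem.Int.mod total 12
  if r ≠ 0 then (base_year + q, r) else (base_year + q - 1, 12)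

def years_months_close_to_py_alt (base_year : Int) (base_month : Int) (max_diff : Option Int) : List (Int × Int) :=
  let md := max_diff.getD 50
  if 1 ≤ md then
    pvNorm base_year base_month ::
      (PySem.List.pyRange 1 (md + 1) 1).foldl
        (fun acc d =>
          acc ++ [pvNorm base_year (base_month + d)] ++
            (if d < md then [pvNorm base_year (base_month - d)] else [])) []
  else []

-- ===== PRECONDITION & SPEC =====
def Spec_years_months_close_to_py (base_year : Int) (base_month : Int) (max_diff : Option Int) (out : List (Int × Int)) : Prop := out = years_months_close_to_py_alt base_year base_month max_diff
instance (base_year : Int) (base_month : Int) (max_diff : Option Int) (out : List (Int × Int)) : Decidable (Spec_years_months_close_to_py base_year base_month max_diff out) := by unfold Spec_years_months_close_to_py; infer_instance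

-- ===== CLAIM (what is proved, stated in full; the proofs are below) =====
def Claim_equal_years_months_close_to_py : Prop := ∀ (base_year : Int) (base_month : Int) (max_diff : Option Int), Dom_years_months_close_to_py base_year base_month max_diff → Spec_years_months_close_to_py base_year base_month max_diff (years_months_close_to_py base_year base_month max_diff)

-- ===== LEMMAS AND PROOFS =====

-- the pairs [+1,-1,+2,-2,…,+n,-n] part, shared shape of both outputs
def pvP (by_ bm : Int) : Nat → List (Int × Int)
  | 0 => []
  | n + 1 => pvP by_ bm n ++ [pvNorm by_ (bm + (n + 1)), pvNorm by_ (bm - (n + 1))]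

-- A's output after 2n loop iterations
def pvOutA (by_ bm : Int) : Nat → List (Int × Int)
  | 0 => []
  | n + 1 => pvOutA by_ bm n ++ [pvNorm by_ (bm - n), pvNorm by_ (bm + (n + 1))]

theorem pvStepA_pair (by_ bm m : Int) (acc : List (Int × Int))
    (hm : PySem.Int.mod m 2 = 0) :
    pvStepA by_ (bm, acc) m = (bm - m, acc ++ [pvNorm by_ (bm - m)]) := by
  simp only [pvStepA, if_pos hm]
  rfl

theorem pvStepA_pair_odd (by_ bm m : Int) (acc : List (Int × Int))
    (hm : ¬ PySem.Int.mod m 2 = 0) :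
    pvStepA by_ (bm, acc) m = (bm + m, acc ++ [pvNorm by_ (bm + m)]) := by
  simp only [pvStepA, if_neg hm]
  rfl

theorem mod2_even (n : Nat) : PySem.Int.mod ((2 * n : Nat) : Int) 2 = 0 := by
  simp [PySem.Int.mod]

theorem mod2_odd (n : Nat) : PySem.Int.mod ((2 * n + 1 : Nat) : Int) 2 = 1 := by
  simp [PySem.Int.mod]

-- A's fold characterized
theorem foldA_eq (by_ bm : Int) (n : Nat) :
    (PySem.List.pyRange 0 (2 * (n : Int)) 1).foldl (pvStepA by_) (bm, []) =
      (bm + n, pvOutA by_ bm n) := by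
  induction n with
  | zero => simp [PySem.List.pyRange_one_eq_nil, pvOutA]
  | succ k ih =>
    have h1 : PySem.List.pyRange 0 (2 * ((k + 1 : Nat) : Int)) 1
        = PySem.List.pyRange 0 (2 * (k : Int)) 1 ++ [(2 * (k : Int))] ++ [2 * (k : Int) + 1] := by
      have e1 : (2 * ((k + 1 : Nat) : Int)) = (2 * (k : Int) + 1) + 1 := by push_cast; ring
      rw [e1, PySem.List.pyRange_one_succ_right (by omega),
          PySem.List.pyRange_one_succ_right (by omega)]
    rw [h1, List.foldl_append, List.foldl_append, ih]
    have he : PySem.Int.mod (2 * (k : Int)) 2 = 0 := by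
      have := mod2_even k; push_cast at this ⊢; exact this
    have ho : ¬ PySem.Int.mod (2 * (k : Int) + 1) 2 = 0 := by
      have := mod2_odd k; push_cast at this ⊢; omega
    simp only [List.foldl_cons, List.foldl_nil,
      pvStepA_pair by_ (bm + k) (2 * (k : Int)) _ he]
    have e2 : bm + (k : Int) - 2 * (k : Int) = bm - k := by ring
    rw [e2, pvStepA_pair_odd by_ (bm - k) (2 * (k : Int) + 1) _ ho]
    have e3 : bm - (k : Int) + (2 * (k : Int) + 1) = bm + ((k : Int) + 1) := by ring
    rw [e3]
    simp only [Prod.mk.injEq, pvOutA]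
    refine ⟨by push_cast; ring, ?_⟩
    simp

-- pvOutA in the head :: pairs ++ tail form
theorem outA_shape (by_ bm : Int) (n : Nat) :
    pvOutA by_ bm (n + 1) =
      pvNorm by_ bm :: (pvP by_ bm n ++ [pvNorm by_ (bm + (n + 1))]) := by
  induction n with
  | zero => simp [pvOutA, pvP]
  | succ k ih =>
    show pvOutA by_ bm (k + 1) ++ _ = _
    rw [ih]
    simp only [pvP]
    simp

-- B's fold on a prefix strictly below md is the unconditional pair list
theorem foldB_prefix (by_ bm : Int) (md : Int) (k : Nat) (hk : (k : Int) < md) :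
    (PySem.List.pyRange 1 ((k : Int) + 1) 1).foldl
        (fun acc d =>
          acc ++ [pvNorm by_ (bm + d)] ++
            (if d < md then [pvNorm by_ (bm - d)] else [])) [] =
      pvP by_ bm k := by
  induction k with
  | zero => simp [PySem.List.pyRange_one_eq_nil, pvP]
  | succ j ih =>
    have h1 : PySem.List.pyRange 1 (((j + 1 : Nat) : Int) + 1) 1
        = PySem.List.pyRange 1 ((j : Int) + 1) 1 ++ [(j : Int) + 1] := by
      have e1 : ((j + 1 : Nat) : Int) + 1 = ((j : Int) + 1) + 1 := by push_cast; ring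
      rw [e1, PySem.List.pyRange_one_succ_right (by omega)]
    rw [h1, List.foldl_append, ih (by push_cast at hk ⊢; omega)]
    have hlt : ((j : Int) + 1) < md := by push_cast at hk; omega
    simp [pvP, hlt]

-- ===== VERDICT (by name: the statement is the Claim_ definition above) =====
theorem years_months_close_to_py_spec : Claim_equal_years_months_close_to_py := by
  intro by_ bm max_diff _
  show years_months_close_to_py by_ bm max_diff = years_months_close_to_py_alt by_ bm max_diff
  unfold years_months_close_to_py years_months_close_to_py_alt
  set md := max_diff.getD 50 with hmd
  by_cases h : 1 ≤ md
  · simp only [if_pos h]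
    obtain ⟨n, hn⟩ : ∃ n : Nat, md = ((n : Int) + 1) := ⟨(md - 1).toNat, by omega⟩
    have hA : md * 2 = 2 * ((n + 1 : Nat) : Int) := by push_cast; omega
    rw [hA, foldA_eq, outA_shape]
    have hB : (PySem.List.pyRange 1 (md + 1) 1).foldl
        (fun acc d =>
          acc ++ [pvNorm by_ (bm + d)] ++
            (if d < md then [pvNorm by_ (bm - d)] else [])) [] =
        pvP by_ bm n ++ [pvNorm by_ (bm + md)] := by
      have hsplit : PySem.List.pyRange 1 (md + 1) 1
          = PySem.List.pyRange 1 ((n : Int) + 1) 1 ++ [md] := by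
        rw [hn]
        exact PySem.List.pyRange_one_succ_right (by omega)
      rw [hsplit, List.foldl_append, foldB_prefix by_ bm md n (by omega)]
      simp
    rw [hB, hn]
  · simp only [if_neg h]
    have : PySem.List.pyRange 0 (md * 2) 1 = [] :=
      PySem.List.pyRange_one_eq_nil (by omega)
    rw [this]
    simp
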